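-- pv_equiv track=rewrite | github.com/Sulynn7/Python_Practice | 7. More about Functions and Modules/7.2 Brush strokes.py | floors
-- ===== SOURCE A (Python) =====
-- def floors(apartments):
--     """
--     >>> apartments = (1, 4, 3, 2, 3, 1)
--     >>> floors(apartments)
--     [[False, True, False, False, False, False], [False, True, True, False, True, False], [False, True, True, True, True, False], [True, True, True, True, True, True]]
--     """
--     a = max(apartments)
--     all_list = []
--     list = []
--     c = 0
--     n = 1
--     for i in range(a):
--         c += 1
--         for i, l in enumerate(apartments):
--             if c == n and l >= a:
--                 list.append(True)
--             elif c == n and l != a: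
--                 list.append(False)
--         n += 1
--         a -= 1
--         all_list.append(list)
--         list = []
--
--     return all_list
-- ===== SOURCE B (Python) =====
-- def floors(apartments):
--     a = max(apartments)
--     cols = [[False] * (a - max(l, 0)) + [True] * max(l, 0) for l in apartments]
--     return [list(row) for row in zip(*cols)]
-- ===== Notes on version B (the rewrite author's own statement) =====
-- stated objective: alternative
-- what changed: B builds one column per apartment as a replicate-False/replicate-True block (no per-cell comparisons and no c==n counter bookkeeping) and transposes the columns with zip(*cols), instead of A's row-by-row double loop with counter variables; Pre_ excludes only the empty list, on which both raise ValueError from max().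
import Mathlib
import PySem

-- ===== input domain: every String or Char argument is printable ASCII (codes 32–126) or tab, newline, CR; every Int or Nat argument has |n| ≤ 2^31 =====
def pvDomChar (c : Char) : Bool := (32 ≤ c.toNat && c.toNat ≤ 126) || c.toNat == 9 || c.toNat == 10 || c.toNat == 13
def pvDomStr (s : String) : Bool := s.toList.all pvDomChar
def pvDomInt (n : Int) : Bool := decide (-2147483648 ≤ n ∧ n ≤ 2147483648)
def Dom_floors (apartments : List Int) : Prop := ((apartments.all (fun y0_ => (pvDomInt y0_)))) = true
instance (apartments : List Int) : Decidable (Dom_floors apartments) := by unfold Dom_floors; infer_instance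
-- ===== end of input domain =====

-- B replaces A's counter-driven row-by-row double loop by building one replicate-False/replicate-True
-- column per apartment and transposing with zip(*cols); equivalence of the return values is proved on
-- nonempty input (both raise ValueError on []).

-- ===== PORT A =====
-- the body of A's outer 'for i in range(a)' loop, over the state (all_list, list, c, n, a)
def pvStepA (apartments : List Int)
    (st : List (List Bool) × List Bool × Int × Int × Int) (_ : Int) :
    List (List Bool) × List Bool × Int × Int × Int :=
  match st with
  | (allList, lst, c, n, a) =>
    let c := c + 1
    let lst := (PySem.List.enumerate apartments 0).foldl
      (fun lst (p : Int × Int) =>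
        if c = n ∧ p.2 ≥ a then lst ++ [true]
        else if c = n ∧ p.2 ≠ a then lst ++ [false]
        else lst) lst
    (allList ++ [lst], ([] : List Bool), c, n + 1, a - 1)

def floors (apartments : List Int) : List (List Bool) :=
  match PySem.List.max? apartments (fun y => y) with
  | none => []   -- Python raises ValueError on max(()); excluded by Pre_floors
  | some a0 =>
    ((PySem.List.pyRange 0 a0 1).foldl (pvStepA apartments) ([], [], 0, 1, a0)).1

-- ===== PORT B =====
-- zip(*cols) for a list of columns: emit the heads, recurse on the tails, stop at the first empty list
def pyZipStar (cols : List (List Bool)) : List (List Bool) :=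
  if _h : cols ≠ [] ∧ ∀ c ∈ cols, c ≠ [] then
    cols.map (fun c => c.headD false) :: pyZipStar (cols.map List.tail)
  else []
termination_by (cols.headD []).length
decreasing_by
  rcases _h with ⟨hne, hall⟩
  cases cols with
  | nil => exact absurd rfl hne
  | cons c rest =>
    simp only [List.headD_cons]
    have : c ≠ [] := hall c (List.mem_cons_self)
    cases c with
    | nil => exact absurd rfl this
    | cons x t => simp

def floors_alt (apartments : List Int) : List (List Bool) :=
  match PySem.List.max? apartments (fun y => y) with
  | none => []   -- Python raises ValueError on max([]); excluded by Pre_floors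
  | some a =>
    let cols := apartments.map (fun l =>
      List.replicate (a - max l 0).toNat false ++ List.replicate (max l 0).toNat true)
    pyZipStar cols

-- ===== PRECONDITION & SPEC =====
-- Pre_ excludes exactly the empty list: there max() raises ValueError in both A and B.
def Pre_floors (apartments : List Int) : Prop := apartments ≠ []
instance (apartments : List Int) : Decidable (Pre_floors apartments) := by unfold Pre_floors; infer_instance
def pvWitness_floors : List Int := [1, 4, 3, 2, 3, 1]

def Spec_floors (apartments : List Int) (out : List (List Bool)) : Prop := out = floors_alt apartments
instance (apartments : List Int) (out : List (List Bool)) : Decidable (Spec_floors apartments out) := by unfold Spec_floors; infer_instance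

-- ===== CLAIM (what is proved, stated in full; the proofs are below) =====
def Claim_equal_floors : Prop := ∀ (apartments : List Int), Dom_floors apartments → Pre_floors apartments → Spec_floors apartments (floors apartments)

-- ===== LEMMAS AND PROOFS =====

-- the common closed form: row r holds (a0 - r ≤ l) for each apartment l
def pvRowAt (apartments : List Int) (a0 : Int) (r : Nat) : List Bool :=
  apartments.map (fun l => decide (a0 - (r : Int) ≤ l))

theorem pvRowAt_shift (apartments : List Int) (a0 : Int) (r : Nat) :
    pvRowAt apartments a0 (r + 1) = pvRowAt apartments (a0 - 1) r := by
  unfold pvRowAt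
  refine List.map_congr_left (fun l _ => ?_)
  simp only [decide_eq_decide]
  push_cast
  omega

-- A's inner enumerate-loop (once c = n has reduced to True) appends exactly one compare-row
theorem pvInner (apartments : List Int) (lst : List Bool) (a : Int) :
    (PySem.List.enumerate apartments 0).foldl
      (fun (lst : List Bool) (p : Int × Int) =>
        if p.2 ≥ a then lst ++ [true]
        else if p.2 ≠ a then lst ++ [false]
        else lst) lst
    = lst ++ apartments.map (fun l => decide (a ≤ l)) := by
  have : ∀ (s : Int) (lst : List Bool),
      (PySem.List.enumerate apartments s).foldl
        (fun (lst : List Bool) (p : Int × Int) =>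
          if p.2 ≥ a then lst ++ [true]
          else if p.2 ≠ a then lst ++ [false]
          else lst) lst
      = lst ++ apartments.map (fun l => decide (a ≤ l)) := by
    induction apartments with
    | nil => intro s lst; simp [PySem.List.enumerate_nil]
    | cons x xs ih =>
      intro s lst
      rw [PySem.List.enumerate_cons]
      simp only [List.foldl_cons, List.map_cons]
      by_cases hx : x ≥ a
      · rw [if_pos hx, ih (s + 1)]
        have hd : decide (a ≤ x) = true := by simpa using hx
        simp [hd]
      · have hne : x ≠ a := by omega
        rw [if_neg hx, if_pos hne, ih (s + 1)]
        have hd : decide (a ≤ x) = false := by simpa using hx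
        simp [hd]
  exact this 0 lst

theorem pvRowAt_zero (apartments : List Int) (a : Int) :
    pvRowAt apartments a 0 = apartments.map (fun l => decide (a ≤ l)) := by
  simp [pvRowAt]

-- A's outer loop, generalized over the remaining iteration list and the running state
theorem pvOuter (apartments : List Int) (is : List Int) (allList : List (List Bool)) (c a : Int) :
    is.foldl (pvStepA apartments) (allList, [], c, c + 1, a)
    = (allList ++ (List.range is.length).map (pvRowAt apartments a),
       [], c + is.length, (c + is.length) + 1, a - is.length) := by
  induction is generalizing allList c a with
  | nil => simp
  | cons i is ih =>
    have hstep : pvStepA apartments (allList, [], c, c + 1, a) i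
        = (allList ++ [pvRowAt apartments a 0], [], c + 1, (c + 1) + 1, a - 1) := by
      simp only [pvStepA, true_and]
      rw [pvInner apartments [] a, pvRowAt_zero]
      simp
    rw [List.foldl_cons, hstep, ih]
    have hrange : (List.range (is.length + 1)).map (pvRowAt apartments a)
        = pvRowAt apartments a 0 :: (List.range is.length).map (pvRowAt apartments (a - 1)) := by
      rw [List.range_succ_eq_map]
      simp only [List.map_cons, List.map_map]
      congr 1
      refine List.map_congr_left (fun r _ => ?_)
      simp only [Function.comp]
      exact pvRowAt_shift apartments a r
    simp only [List.length_cons, hrange, Prod.mk.injEq]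
    and_intros <;> first | omega | simp

theorem pvFloorsA (apartments : List Int) (a0 : Int)
    (h : PySem.List.max? apartments (fun y => y) = some a0) :
    floors apartments = (List.range a0.toNat).map (pvRowAt apartments a0) := by
  unfold floors
  rw [h]
  show ((PySem.List.pyRange 0 a0 1).foldl (pvStepA apartments) ([], [], 0, 1, a0)).1
      = (List.range a0.toNat).map (pvRowAt apartments a0)
  have h2 := pvOuter apartments (PySem.List.pyRange 0 a0 1) [] 0 a0
  simp only [zero_add] at h2
  rw [h2]
  simp [PySem.List.length_pyRange_one]

-- B side: indexing into a False-block ++ True-block column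
theorem pvGetD_rep_rep (p q r : Nat) (h : r < p + q) :
    (List.replicate p false ++ List.replicate q true).getD r false = decide (p ≤ r) := by
  by_cases hr : r < p
  · have hnp : ¬ p ≤ r := by omega
    rw [List.getD_eq_getElem?_getD, List.getElem?_append_left (by simpa using hr)]
    simp [hr, hnp]
  · have hp : p ≤ r := by omega
    have hq : r - p < q := by omega
    rw [List.getD_eq_getElem?_getD, List.getElem?_append_right (by simpa using hp)]
    simp [hq, hp]

-- zip(*cols) on equal-length nonempty column lists is the index-wise transpose
theorem pvZipStar_eq (n : Nat) :
    ∀ (cols : List (List Bool)), cols ≠ [] → (∀ c ∈ cols, c.length = n) →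
      pyZipStar cols = (List.range n).map (fun r => cols.map (fun c => c.getD r false)) := by
  induction n with
  | zero =>
    intro cols hne hlen
    rw [pyZipStar]
    rw [dif_neg]
    · simp
    · rintro ⟨-, hall⟩
      cases cols with
      | nil => exact hne rfl
      | cons c rest =>
        have : c = [] := List.eq_nil_of_length_eq_zero (hlen c List.mem_cons_self)
        exact hall c List.mem_cons_self this
  | succ n ih =>
    intro cols hne hlen
    have hall : ∀ c ∈ cols, c ≠ [] := by
      intro c hc hnil
      have := hlen c hc
      rw [hnil] at this
      simp at this
    rw [pyZipStar, dif_pos ⟨hne, hall⟩]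
    have htne : cols.map List.tail ≠ [] := by
      cases cols with
      | nil => exact absurd rfl hne
      | cons c rest => simp
    have htlen : ∀ t ∈ cols.map List.tail, t.length = n := by
      intro t ht
      rcases List.mem_map.mp ht with ⟨c, hc, rfl⟩
      have h1 := hlen c hc
      have h2 := hall c hc
      cases c with
      | nil => exact absurd rfl h2
      | cons x cs => simpa using h1
    rw [ih (cols.map List.tail) htne htlen]
    rw [List.range_succ_eq_map]
    simp only [List.map_cons, List.map_map]
    congr 1
    · refine List.map_congr_left (fun c hc => ?_)
      have hcn := hall c hc
      cases c with
      | nil => exact absurd rfl hcn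
      | cons x cs => simp
    · refine List.map_congr_left (fun r _ => ?_)
      simp only [Function.comp]
      refine List.map_congr_left (fun c hc => ?_)
      simp only [Function.comp]
      have hcn := hall c hc
      cases c with
      | nil => exact absurd rfl hcn
      | cons x cs => simp

theorem pvFloorsB (apartments : List Int) (a0 : Int)
    (hne : apartments ≠ [])
    (h : PySem.List.max? apartments (fun y => y) = some a0) :
    floors_alt apartments = (List.range a0.toNat).map (pvRowAt apartments a0) := by
  unfold floors_alt
  rw [h]
  show pyZipStar (apartments.map (fun l =>
      List.replicate (a0 - max l 0).toNat false ++ List.replicate (max l 0).toNat true))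
      = (List.range a0.toNat).map (pvRowAt apartments a0)
  have hmax : ∀ l ∈ apartments, l ≤ a0 := by
    intro l hl
    exact PySem.List.max?_isMax h l hl
  set colOf : Int → List Bool := fun l =>
    List.replicate (a0 - max l 0).toNat false ++ List.replicate (max l 0).toNat true with hcol
  have hlen : ∀ c ∈ apartments.map colOf, c.length = a0.toNat := by
    intro c hc
    rcases List.mem_map.mp hc with ⟨l, hl, rfl⟩
    have hla := hmax l hl
    simp only [hcol, List.length_append, List.length_replicate]
    rcases le_total l 0 with h0 | h0
    · rw [max_eq_right h0]
      simp
    · rw [max_eq_left h0]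
      omega
  have hcne : apartments.map colOf ≠ [] := by
    cases apartments with
    | nil => exact absurd rfl hne
    | cons x xs => simp
  rw [pvZipStar_eq a0.toNat (apartments.map colOf) hcne hlen]
  refine List.map_congr_left (fun r hr => ?_)
  have hrn : r < a0.toNat := List.mem_range.mp hr
  unfold pvRowAt
  rw [List.map_map]
  refine List.map_congr_left (fun l hl => ?_)
  have hla := hmax l hl
  simp only [Function.comp, hcol]
  have hsum : (a0 - max l 0).toNat + (max l 0).toNat = a0.toNat := by
    rcases le_total l 0 with h0 | h0
    · rw [max_eq_right h0]
      simp
    · rw [max_eq_left h0]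
      omega
  rw [pvGetD_rep_rep _ _ r (by omega)]
  simp only [decide_eq_decide]
  rcases le_total l 0 with h0 | h0
  · rw [max_eq_right h0] at hsum ⊢
    omega
  · rw [max_eq_left h0]
    omega

-- ===== VERDICT (by name: the statement is the Claim_ definition above) =====
theorem floors_spec : Claim_equal_floors := by
  intro apartments _ hpre
  unfold Spec_floors
  cases hmax : PySem.List.max? apartments (fun y => y) with
  | none => exact absurd ((PySem.List.max?_eq_none_iff apartments (fun y => y)).mp hmax) hpre
  | some a0 => rw [pvFloorsA apartments a0 hmax, pvFloorsB apartments a0 hpre hmax]
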